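-- pv_equiv track=rewrite | github.com/Dominexis/Collatz-Conjecture | generic.py | convert_sequence_to_powers
-- ===== SOURCE A (Python) =====
-- def convert_sequence_to_powers(sequence: list[int]) -> list[int]:
--     powers: list[int] = []
--
--     for value in sequence:
--         if value%2:
--             powers.append(1)
--         else:
--             if len(powers) > 0:
--                 powers[-1] *= 2
--             else:
--                 powers.append(2)
--
--     if powers[-1] == 1:
--         powers.pop()
--
--     return powers
-- ===== SOURCE B (Python) =====
-- def convert_sequence_to_powers(sequence: list[int]) -> list[int]:
--     powers: list[int] = []
--     i, n = 0, len(sequence)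
--     while i < n:
--         p = sequence[i] % 2
--         j = i + 1
--         while j < n and sequence[j] % 2 == p:
--             j += 1
--         k = j - i
--         if p:
--             powers.extend([1] * k)
--         elif powers:
--             powers[-1] *= 2 ** k
--         else:
--             powers.append(2 ** k)
--         i = j
--     if powers[-1] == 1:
--         powers.pop()
--     return powers
-- ===== Notes on version B (the rewrite author's own statement) =====
-- stated objective: alternative
-- what changed: B walks maximal runs of equal parity (groupby-style two-level index loop) and handles each run at once (extend with k ones / multiply last by 2**k), instead of A's per-element loop that doubles the last entry one step at a time.
import Mathlib
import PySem

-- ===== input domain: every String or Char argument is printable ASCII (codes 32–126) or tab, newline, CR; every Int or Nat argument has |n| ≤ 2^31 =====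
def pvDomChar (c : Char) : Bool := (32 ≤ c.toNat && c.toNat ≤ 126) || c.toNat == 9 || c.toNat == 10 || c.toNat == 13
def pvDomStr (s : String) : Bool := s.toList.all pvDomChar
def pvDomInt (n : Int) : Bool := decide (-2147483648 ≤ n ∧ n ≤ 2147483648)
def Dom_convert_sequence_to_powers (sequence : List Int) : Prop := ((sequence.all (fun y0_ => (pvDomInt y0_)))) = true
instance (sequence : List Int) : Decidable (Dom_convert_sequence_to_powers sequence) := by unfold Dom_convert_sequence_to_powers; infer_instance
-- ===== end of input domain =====

-- B walks maximal runs of equal parity and handles each run at once, instead of A's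
-- per-element loop that doubles the last entry one step at a time (objective: alternative).

-- ===== PORT A =====

-- Python: multiply the LAST element in place (list unchanged if empty,
-- but A's branch only reaches it when the list is nonempty)
def pvMulLast : List Int → Int → List Int
  | [], _ => []
  | [x], k => [x * k]
  | x :: y :: xs, k => x :: pvMulLast (y :: xs) k

-- body of A's for-loop
def pvStepA (powers : List Int) (value : Int) : List Int :=
  if PySem.Int.mod value 2 ≠ 0 then powers ++ [1]
  else if powers.length > 0 then pvMulLast powers 2
  else powers ++ [2]

def convert_sequence_to_powers (sequence : List Int) : List Int :=
  let powers := sequence.foldl pvStepA []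
  -- final trim: pop the trailing 1 if present; empty powers raises IndexError (excluded by Pre_)
  match powers.getLast? with
  | some 1 => powers.dropLast
  | _ => powers

-- ===== PORT B =====

-- B-side copy: multiply the LAST element in place
def pvMulLastB : List Int → Int → List Int
  | [], _ => []
  | [x], k => [x * k]
  | x :: y :: xs, k => x :: pvMulLastB (y :: xs) k

-- run-based loop: the inner while of Source B collects the maximal run of parity p
def pvGoB : List Int → List Int → List Int
  | powers, [] => powers
  | powers, v :: rest =>
    let p := PySem.Int.mod v 2
    let run := rest.takeWhile (fun x => PySem.Int.mod x 2 == p)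
    let rest' := rest.dropWhile (fun x => PySem.Int.mod x 2 == p)
    let k := run.length + 1
    let powers' :=
      if p ≠ 0 then powers ++ List.replicate k 1
      else if powers.length > 0 then pvMulLastB powers (2 ^ k)
      else powers ++ [2 ^ k]
    pvGoB powers' rest'
termination_by _ l => l.length
decreasing_by
  exact Nat.lt_succ_of_le (List.length_dropWhile_le _ _)

def convert_sequence_to_powers_alt (sequence : List Int) : List Int :=
  let powers := pvGoB [] sequence
  -- final trim: pop the trailing 1 if present; empty powers raises IndexError (excluded by Pre_)
  if powers.getLast? = some 1 then powers.dropLast else powers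

-- ===== PRECONDITION & SPEC =====
-- A (and B) raise IndexError at the final last-element read on the empty sequence; nothing else is excluded.
def Pre_convert_sequence_to_powers (sequence : List Int) : Prop := sequence ≠ []
instance (sequence : List Int) : Decidable (Pre_convert_sequence_to_powers sequence) := by
  unfold Pre_convert_sequence_to_powers; infer_instance
def pvWitness_convert_sequence_to_powers : List Int := [3]

def Spec_convert_sequence_to_powers (sequence : List Int) (out : List Int) : Prop :=
  out = convert_sequence_to_powers_alt sequence
instance (sequence : List Int) (out : List Int) : Decidable (Spec_convert_sequence_to_powers sequence out) := by
  unfold Spec_convert_sequence_to_powers; infer_instance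

-- ===== CLAIM (what is proved, stated in full; the proofs are below) =====
def Claim_equal_convert_sequence_to_powers : Prop :=
  ∀ (sequence : List Int), Dom_convert_sequence_to_powers sequence →
    Pre_convert_sequence_to_powers sequence →
    Spec_convert_sequence_to_powers sequence (convert_sequence_to_powers sequence)

-- ===== LEMMAS AND PROOFS =====

theorem pvMulLastB_eq (l : List Int) (k : Int) : pvMulLastB l k = pvMulLast l k := by
  induction l with
  | nil => rfl
  | cons x xs ih =>
    cases xs with
    | nil => rfl
    | cons y ys => rw [show pvMulLastB (x :: y :: ys) k = x :: pvMulLastB (y :: ys) k from rfl, ih]; rfl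

theorem pvMulLast_ne_nil {l : List Int} (h : l ≠ []) (k : Int) : pvMulLast l k ≠ [] := by
  match l with
  | [x] => simp [pvMulLast]
  | x :: y :: xs => simp [pvMulLast]

theorem pvMulLast_cons_cons (x y : Int) (xs : List Int) (k : Int) :
    pvMulLast (x :: y :: xs) k = x :: pvMulLast (y :: xs) k := rfl

theorem pvMulLast_one (l : List Int) : pvMulLast l 1 = l := by
  induction l with
  | nil => rfl
  | cons x xs ih =>
    cases xs with
    | nil => simp [pvMulLast]
    | cons y ys => rw [pvMulLast_cons_cons, ih]

theorem pvMulLast_mulLast : ∀ (l : List Int) (a b : Int),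
    pvMulLast (pvMulLast l a) b = pvMulLast l (a * b)
  | [], _, _ => rfl
  | [x], a, b => by simp [pvMulLast, mul_assoc]
  | x :: y :: xs, a, b => by
    obtain ⟨z, zs, hz⟩ : ∃ z zs, pvMulLast (y :: xs) a = z :: zs := by
      cases xs <;> exact ⟨_, _, rfl⟩
    rw [pvMulLast_cons_cons, hz, pvMulLast_cons_cons, ← hz,
      pvMulLast_mulLast (y :: xs) a b, pvMulLast_cons_cons]

theorem pvStepA_odd (powers : List Int) (v : Int) (hv : PySem.Int.mod v 2 ≠ 0) :
    pvStepA powers v = powers ++ [1] := by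
  unfold pvStepA; rw [if_pos hv]

theorem pvStepA_even (powers : List Int) (v : Int) (hv : PySem.Int.mod v 2 = 0)
    (hne : powers ≠ []) : pvStepA powers v = pvMulLast powers 2 := by
  unfold pvStepA
  rw [if_neg (fun hc => hc hv), if_pos (List.length_pos_of_ne_nil hne)]

theorem pvStepA_even_nil (v : Int) (hv : PySem.Int.mod v 2 = 0) :
    pvStepA [] v = [2] := by
  unfold pvStepA
  rw [if_neg (fun hc => hc hv), if_neg (by simp)]
  rfl

-- a run of odd values appends that many 1s
theorem foldl_odd_run (run : List Int) (powers : List Int)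
    (h : ∀ x ∈ run, PySem.Int.mod x 2 ≠ 0) :
    run.foldl pvStepA powers = powers ++ List.replicate run.length 1 := by
  induction run generalizing powers with
  | nil => simp
  | cons v vs ih =>
    rw [List.foldl_cons, pvStepA_odd _ _ (h v (by simp)),
      ih (powers ++ [1]) (fun x hx => h x (by simp [hx]))]
    simp [List.append_assoc, List.replicate_succ]

-- a run of even values multiplies the (nonempty) last entry by 2^len
theorem foldl_even_run (run : List Int) (powers : List Int)
    (h : ∀ x ∈ run, PySem.Int.mod x 2 = 0) (hne : powers ≠ []) :
    run.foldl pvStepA powers = pvMulLast powers (2 ^ run.length) := by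
  induction run generalizing powers with
  | nil => simp [pvMulLast_one]
  | cons v vs ih =>
    rw [List.foldl_cons, pvStepA_even _ _ (h v (by simp)) hne,
      ih (pvMulLast powers 2) (fun x hx => h x (by simp [hx])) (pvMulLast_ne_nil hne 2),
      pvMulLast_mulLast]
    rw [List.length_cons, pow_succ, mul_comm]

theorem pvGoB_eq_foldl_aux (n : Nat) : ∀ (seq powers : List Int), seq.length ≤ n →
    pvGoB powers seq = seq.foldl pvStepA powers := by
  induction n with
  | zero =>
    intro seq powers h
    have : seq = [] := List.eq_nil_of_length_eq_zero (Nat.le_zero.mp h)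
    subst this
    rw [pvGoB, List.foldl_nil]
  | succ n ihn =>
    intro seq powers h
    match seq with
    | [] => rw [pvGoB, List.foldl_nil]
    | v :: rest =>
      rw [pvGoB]
      simp only [pvMulLastB_eq]
      have hlt : (rest.dropWhile (fun x => PySem.Int.mod x 2 == PySem.Int.mod v 2)).length ≤ n := by
        have := List.length_dropWhile_le (fun x => PySem.Int.mod x 2 == PySem.Int.mod v 2) rest
        simp only [List.length_cons] at h
        omega
      rw [ihn _ _ hlt]
      conv_rhs => rw [show v :: rest
        = (v :: rest.takeWhile (fun x => PySem.Int.mod x 2 == PySem.Int.mod v 2))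
          ++ rest.dropWhile (fun x => PySem.Int.mod x 2 == PySem.Int.mod v 2) from by
        rw [List.cons_append, List.takeWhile_append_dropWhile]]
      rw [List.foldl_append]
      congr 1
      rw [List.foldl_cons]
      have hmem : ∀ x ∈ rest.takeWhile (fun x => PySem.Int.mod x 2 == PySem.Int.mod v 2),
          PySem.Int.mod x 2 = PySem.Int.mod v 2 := by
        intro x hx
        exact beq_iff_eq.mp (List.mem_takeWhile_imp (p := fun x => PySem.Int.mod x 2 == PySem.Int.mod v 2) hx)
      by_cases hp : PySem.Int.mod v 2 ≠ 0
      · rw [if_pos hp, pvStepA_odd _ _ hp,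
          foldl_odd_run _ _ (fun x hx => by rw [hmem x hx]; exact hp)]
        simp [List.replicate_succ, List.append_assoc]
      · simp only [ne_eq, not_not] at hp
        rw [if_neg (not_not_intro hp)]
        by_cases hne : powers = []
        · subst hne
          rw [if_neg (by simp), pvStepA_even_nil _ hp,
            foldl_even_run _ _ (fun x hx => (hmem x hx).trans hp) (by simp)]
          simp [pvMulLast, pow_succ, mul_comm]
        · rw [if_pos (List.length_pos_of_ne_nil hne), pvStepA_even _ _ hp hne,
            foldl_even_run _ _ (fun x hx => (hmem x hx).trans hp) (pvMulLast_ne_nil hne 2),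
            pvMulLast_mulLast]
          congr 1
          rw [pow_succ, mul_comm]

theorem pvGoB_eq_foldl (powers seq : List Int) :
    pvGoB powers seq = seq.foldl pvStepA powers :=
  pvGoB_eq_foldl_aux seq.length seq powers le_rfl

-- ===== VERDICT (by name: the statement is the Claim_ definition above) =====
theorem convert_sequence_to_powers_spec : Claim_equal_convert_sequence_to_powers := by
  intro sequence _ _
  unfold Spec_convert_sequence_to_powers convert_sequence_to_powers convert_sequence_to_powers_alt
  rw [pvGoB_eq_foldl]
  generalize List.foldl pvStepA [] sequence = l
  show (match l.getLast? with | some 1 => l.dropLast | _ => l)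
      = if l.getLast? = some 1 then l.dropLast else l
  split
  · next h => rw [if_pos h]
  · next x h =>
      rw [if_neg]
      intro hc
      exact h hc
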